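-- pv_equiv track=rewrite | github.com/bio-ontology-research-group/hapli | benchmarks/mave/experimental_epistasis.py | _decode_aa_string
-- ===== SOURCE A (Python) =====
-- _AA3_TO_1 = {
--     "Ala": "A", "Arg": "R", "Asn": "N", "Asp": "D", "Cys": "C",
--     "Gln": "Q", "Glu": "E", "Gly": "G", "His": "H", "Ile": "I",
--     "Leu": "L", "Lys": "K", "Met": "M", "Phe": "F", "Pro": "P",
--     "Ser": "S", "Thr": "T", "Trp": "W", "Tyr": "Y", "Val": "V",
-- }
--
-- def _aa1(code: str) -> str | None:
--     if code in _AA3_TO_1: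
--         return _AA3_TO_1[code]
--     if len(code) == 1 and code in "ACDEFGHIKLMNPQRSTVWY":
--         return code
--     return None
--
-- def _decode_aa_string(s: str) -> str | None:
--     if all(c in "ACDEFGHIKLMNPQRSTVWY" for c in s):
--         return s
--     if len(s) % 3 != 0:
--         return None
--     out = []
--     for i in range(0, len(s), 3):
--         c = _aa1(s[i : i + 3])
--         if c is None:
--             return None
--         out.append(c)
--     return "".join(out)
-- ===== SOURCE B (Python) =====
-- _AA3_TO_1 = {
--     "Ala": "A", "Arg": "R", "Asn": "N", "Asp": "D", "Cys": "C",
--     "Gln": "Q", "Glu": "E", "Gly": "G", "His": "H", "Ile": "I",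
--     "Leu": "L", "Lys": "K", "Met": "M", "Phe": "F", "Pro": "P",
--     "Ser": "S", "Thr": "T", "Trp": "W", "Tyr": "Y", "Val": "V",
-- }
--
-- _SINGLE = frozenset("ACDEFGHIKLMNPQRSTVWY")
--
--
-- def _decode3(s):
--     # Recursively peel one three-letter code off the front; any leftover
--     # short tail or unknown code makes the whole decode fail.
--     if not s:
--         return ""
--     c = _AA3_TO_1.get(s[:3])
--     if c is None:
--         return None
--     rest = _decode3(s[3:])
--     if rest is None:
--         return None
--     return c + rest
--
--
-- def _decode_aa_string(s):
--     if all(c in _SINGLE for c in s):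
--         return s
--     return _decode3(s)
-- ===== Notes on version B (the rewrite author's own statement) =====
-- stated objective: simpler
-- what changed: Replaces A's separate len%3 pre-check plus indexed for-loop over 3-char windows with an accumulator list by a single recursion that peels one three-letter code off the front and propagates failure (a short or unknown leftover chunk fails by itself).
import Mathlib
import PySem

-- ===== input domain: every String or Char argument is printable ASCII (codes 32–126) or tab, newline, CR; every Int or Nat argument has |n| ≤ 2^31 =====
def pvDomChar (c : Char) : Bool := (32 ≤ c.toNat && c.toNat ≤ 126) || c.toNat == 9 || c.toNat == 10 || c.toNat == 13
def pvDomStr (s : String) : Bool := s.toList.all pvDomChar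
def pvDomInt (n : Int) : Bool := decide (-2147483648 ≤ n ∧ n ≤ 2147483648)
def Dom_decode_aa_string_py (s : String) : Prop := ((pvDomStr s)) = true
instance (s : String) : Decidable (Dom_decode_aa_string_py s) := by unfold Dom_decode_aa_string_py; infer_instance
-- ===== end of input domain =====

-- B replaces A's indexed 3-char-window loop (with its separate len%3 pre-check and
-- accumulator list) by a recursion that peels one 3-letter code off the front,
-- propagating failure; objective: simpler. Equal return value for every input.

-- shared module constants (the dict literal _AA3_TO_1 and the single-letter alphabet)
def pvAA3 : PySem.Dict (List Char) (List Char) :=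
  PySem.Dict.mk [("Ala".toList, "A".toList), ("Arg".toList, "R".toList),
    ("Asn".toList, "N".toList), ("Asp".toList, "D".toList), ("Cys".toList, "C".toList),
    ("Gln".toList, "Q".toList), ("Glu".toList, "E".toList), ("Gly".toList, "G".toList),
    ("His".toList, "H".toList), ("Ile".toList, "I".toList), ("Leu".toList, "L".toList),
    ("Lys".toList, "K".toList), ("Met".toList, "M".toList), ("Phe".toList, "F".toList),
    ("Pro".toList, "P".toList), ("Ser".toList, "S".toList), ("Thr".toList, "T".toList),
    ("Trp".toList, "W".toList), ("Tyr".toList, "Y".toList), ("Val".toList, "V".toList)]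

def pvSingles : List Char := "ACDEFGHIKLMNPQRSTVWY".toList

-- ===== PORT A =====
-- _aa1: dict membership+lookup, then the single-letter fallback (len(code)==1 and code in the alphabet string)
def pvAa1 (code : List Char) : Option (List Char) :=
  match pvAA3.get? code with
  | some v => some v
  | none =>
    match code with
    | [c] => if pvSingles.contains c then some [c] else none
    | _ => none

-- the for-loop over range(0, len(s), 3): s[i:i+3] is (l.drop i).take 3 (PySem.List.slice_natCast_add),
-- out is the accumulator list, "".join(out) is out.flatten
def pvLoopA (l : List Char) (i : Nat) (out : List (List Char)) : Option (List Char) :=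
  if _h : i < l.length then
    match pvAa1 ((l.drop i).take 3) with
    | none => none
    | some c => pvLoopA l (i + 3) (out ++ [c])
  else some out.flatten
termination_by l.length - i

def decode_aa_string_py (s : String) : Option String :=
  let l := s.toList
  if l.all (fun c => pvSingles.contains c) then some s
  else if l.length % 3 ≠ 0 then none
  else (pvLoopA l 0 []).map String.ofList

-- ===== PORT B =====
-- _decode3: peel _AA3_TO_1.get(s[:3]) off the front, recurse on s[3:], propagate None
def pvDec3 (l : List Char) : Option (List Char) :=
  if _hε : l = [] then some []
  else
    match pvAA3.get? (l.take 3) with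
    | none => none
    | some c =>
      match pvDec3 (l.drop 3) with
      | none => none
      | some rest => some (c ++ rest)
termination_by l.length
decreasing_by cases l with
  | nil => exact absurd rfl _hε
  | cons a t => simp

def decode_aa_string_py_alt (s : String) : Option String :=
  let l := s.toList
  if l.all (fun c => pvSingles.contains c) then some s
  else (pvDec3 l).map String.ofList

-- ===== PRECONDITION & SPEC =====
def Spec_decode_aa_string_py (s : String) (out : Option String) : Prop := out = decode_aa_string_py_alt s
instance (s : String) (out : Option String) : Decidable (Spec_decode_aa_string_py s out) := by unfold Spec_decode_aa_string_py; infer_instance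

-- ===== CLAIM (what is proved, stated in full; the proofs are below) =====
def Claim_equal_decode_aa_string_py : Prop := ∀ (s : String), Dom_decode_aa_string_py s → Spec_decode_aa_string_py s (decode_aa_string_py s)

-- ===== LEMMAS AND PROOFS =====

-- every key of the dict literal has length 3
lemma pvAA3_key_len {k v : List Char} (h : pvAA3.get? k = some v) : k.length = 3 := by
  have hc : pvAA3.contains k = true := by
    rw [PySem.Dict.contains_eq_isSome_get?, h]; rfl
  have hk : k ∈ pvAA3.keys := (PySem.Dict.contains_iff_mem_keys _ _).mp hc
  simp [pvAA3, PySem.Dict.keys_mk] at hk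
  rcases hk with rfl|rfl|rfl|rfl|rfl|rfl|rfl|rfl|rfl|rfl|rfl|rfl|rfl|rfl|rfl|rfl|rfl|rfl|rfl|rfl <;> decide

-- on a chunk of length 3, _aa1 is exactly the dict lookup (the len==1 fallback cannot fire)
lemma pvAa1_len3 {code : List Char} (h : code.length = 3) :
    pvAa1 code = pvAA3.get? code := by
  match code, h with
  | [a, b, c], _ =>
    unfold pvAa1
    cases pvAA3.get? [a, b, c] <;> rfl

-- B fails on any string whose length is not a multiple of 3
lemma pvDec3_not_mod3 (l : List Char) (h : l.length % 3 ≠ 0) : pvDec3 l = none := by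
  have hne : l ≠ [] := by
    intro he; rw [he] at h; simp at h
  rw [pvDec3, dif_neg hne]
  cases hg : pvAA3.get? (l.take 3) with
  | none => simp
  | some c =>
    have hk : (l.take 3).length = 3 := pvAA3_key_len hg
    have hl : 3 ≤ l.length := by simp at hk; omega
    have : (l.drop 3).length % 3 ≠ 0 := by simp; omega
    simp [pvDec3_not_mod3 (l.drop 3) this]
termination_by l.length
decreasing_by simp; omega

-- loop invariant: when |l| ≡ 0 and i ≡ 0 (mod 3), A's loop from i equals B's recursion on l.drop i
lemma pvLoopA_eq_dec3 (l : List Char) (hl : l.length % 3 = 0) (i : Nat)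
    (out : List (List Char)) (hi : i % 3 = 0) :
    pvLoopA l i out = (pvDec3 (l.drop i)).map (fun r => out.flatten ++ r) := by
  rw [pvLoopA]
  by_cases h : i < l.length
  · simp only [h, dif_pos]
    have h3 : 3 ≤ l.length - i := by omega
    have hchunk : ((l.drop i).take 3).length = 3 := by simp; omega
    have hne : l.drop i ≠ [] := by
      intro he
      have := congrArg List.length he
      simp at this; omega
    rw [pvDec3, dif_neg hne]
    rw [pvAa1_len3 hchunk]
    cases hg : pvAA3.get? ((l.drop i).take 3) with
    | none => rfl
    | some c =>
      dsimp only
      have hdd : (l.drop i).drop 3 = l.drop (i + 3) := by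
        rw [List.drop_drop]
      rw [hdd, pvLoopA_eq_dec3 l hl (i + 3) (out ++ [c]) (by omega)]
      cases pvDec3 (l.drop (i + 3)) with
      | none => rfl
      | some rest => simp
  · simp only [h, dif_neg, not_false_iff]
    have : l.drop i = [] := by
      rw [List.drop_eq_nil_iff]; omega
    rw [this, pvDec3]
    simp
termination_by l.length - i
decreasing_by omega

-- ===== VERDICT (by name: the statement is the Claim_ definition above) =====
theorem decode_aa_string_py_spec : Claim_equal_decode_aa_string_py := by
  intro s _
  unfold Spec_decode_aa_string_py decode_aa_string_py decode_aa_string_py_alt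
  dsimp only
  by_cases hall : (s.toList.all fun c => pvSingles.contains c) = true
  · rw [if_pos hall, if_pos hall]
  · rw [if_neg hall, if_neg hall]
    by_cases hm : s.toList.length % 3 = 0
    · rw [if_neg (by omega), pvLoopA_eq_dec3 s.toList hm 0 [] (by omega)]
      simp
    · rw [if_pos hm, pvDec3_not_mod3 s.toList hm]; rfl
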